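-- pv_equiv track=rewrite | github.com/gurjotsc/gcheema-cp | leetcode/medium/minimumNumberOfOperationsToReinitializeAPermutation.py | reinitializePermutation
-- ===== SOURCE A (Python) =====
-- def reinitializePermutation(n: int) -> int:
--     perm = [i for i in range(n)]
--     arr = [perm[i//2] if not (i%2) else perm[((n//2)+((i-1)//2))] for i in range(n)]
--     res = 1
--     while arr != perm:
--         arr = [arr[i//2] if not (i%2) else arr[((n//2)+((i-1)//2))] for i in range(n)]
--         res += 1
--     return res
-- ===== SOURCE B (Python) =====
-- def reinitializePermutation(n: int) -> int:
--     # Track only where index 1 travels: one shuffle sends position p to 2*p mod (n-1),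
--     # and the whole permutation is back to identity exactly when position 1 returns to 1.
--     if n <= 2:
--         return 1
--     res = 0
--     pos = 1
--     while True:
--         pos = pos * 2 % (n - 1)
--         res += 1
--         if pos == 1:
--             return res
-- ===== Notes on version B (the rewrite author's own statement) =====
-- stated objective: faster
-- what changed: Instead of repeatedly rebuilding the whole n-element array until it equals the identity, B tracks only the position of index 1 (pos -> 2*pos mod (n-1)) and counts steps until it returns to 1; intended as faster (O(res) vs O(n*res)); a timing run measured B ~2815x faster at the largest size both finished (odd timing inputs diverge for both programs and are outside Pre_).
import Mathlib
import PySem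

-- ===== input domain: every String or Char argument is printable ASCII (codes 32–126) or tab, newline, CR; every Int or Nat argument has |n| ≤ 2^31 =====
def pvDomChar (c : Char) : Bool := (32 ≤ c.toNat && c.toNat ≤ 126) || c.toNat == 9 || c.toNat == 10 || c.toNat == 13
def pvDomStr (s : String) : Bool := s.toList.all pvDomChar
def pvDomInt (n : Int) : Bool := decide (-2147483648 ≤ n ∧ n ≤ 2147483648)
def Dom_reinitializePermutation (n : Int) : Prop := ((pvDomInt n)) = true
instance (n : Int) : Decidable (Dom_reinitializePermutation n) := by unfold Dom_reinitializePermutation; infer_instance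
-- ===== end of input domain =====

-- B replaces A's whole-array iteration by tracking only the position of index 1 (pos -> 2*pos mod (n-1)).

-- ===== PORT A =====
-- one perfect-shuffle step: [arr[i//2] if not (i%2) else arr[(n//2)+((i-1)//2)] for i in range(n)]
-- (for a list of length n every index used is in range, so pyGetD with default 0 is exact here)
def pvShuffle (n : Int) (a : List Int) : List Int :=
  (PySem.List.pyRange 0 n 1).map (fun i =>
    if PySem.Int.mod i 2 = 0 then PySem.List.pyGetD a (PySem.Int.floordiv i 2) 0
    else PySem.List.pyGetD a (PySem.Int.floordiv n 2 + PySem.Int.floordiv (i-1) 2) 0)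

-- the 'while arr != perm' loop; the fuel only makes the recursion total (A diverges exactly on
-- odd n ≥ 3, which Pre_ excludes; inside Pre_ the fuel is proved never to run out)
def pvLoopA (n : Int) (perm : List Int) : Nat → List Int → Int → Int
  | 0, _, res => res
  | fuel+1, arr, res => if arr = perm then res else pvLoopA n perm fuel (pvShuffle n arr) (res + 1)

def reinitializePermutation (n : Int) : Int :=
  let perm := PySem.List.pyRange 0 n 1
  pvLoopA n perm (n.toNat + 1) (pvShuffle n perm) 1

-- ===== PORT B =====
-- the 'while True' loop of Source B; the fuel only makes the recursion total (inside Pre_ it never runs out)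
def pvLoopB (m : Int) : Nat → Int → Int → Int
  | 0, _, res => res
  | fuel+1, pos, res =>
      let pos' := PySem.Int.mod (pos * 2) m
      if pos' = 1 then res + 1 else pvLoopB m fuel pos' (res + 1)

def reinitializePermutation_alt (n : Int) : Int :=
  if n ≤ 2 then 1 else pvLoopB (n - 1) n.toNat 1 0

-- ===== PRECONDITION & SPEC =====
-- Pre_ excludes exactly the odd n ≥ 3, on which Python A (and Python B too) loops forever.
def Pre_reinitializePermutation (n : Int) : Prop := n ≤ 2 ∨ (2 : Int) ∣ n
instance (n : Int) : Decidable (Pre_reinitializePermutation n) := by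
  unfold Pre_reinitializePermutation; infer_instance

def pvWitness_reinitializePermutation : Int := 6

def Spec_reinitializePermutation (n : Int) (out : Int) : Prop := out = reinitializePermutation_alt n
instance (n : Int) (out : Int) : Decidable (Spec_reinitializePermutation n out) := by
  unfold Spec_reinitializePermutation; infer_instance

-- ===== CLAIM (what is proved, stated in full; the proofs are below) =====
def Claim_equal_reinitializePermutation : Prop :=
  ∀ (n : Int), Dom_reinitializePermutation n → Pre_reinitializePermutation n →
    Spec_reinitializePermutation n (reinitializePermutation n)

-- ===== LEMMAS AND PROOFS =====
-- closed form of A's array after k shuffles (with M = N-1 and h = N/2 = 2⁻¹ mod M):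
-- entry i is i·h^k mod M, with the fixed point M at the end; A stops when h^k ≡ 1, i.e. 2^k ≡ 1,
-- which is exactly when B's tracked position 2^k mod M returns to 1.
def pvArr (N k : Nat) : List Int :=
  (List.range N).map (fun i => if i < N - 1 then ((i * (N / 2) ^ k % (N - 1) : Nat) : Int) else (i : Int))

theorem pvShuffle_step (N k : Nat) (h4 : 4 ≤ N) (hev : 2 ∣ N) :
    pvShuffle (N : Int) (pvArr N k) = pvArr N (k + 1) := by
  obtain ⟨h, hN⟩ := hev
  have hh : 2 ≤ h := by omega
  unfold pvShuffle
  rw [PySem.List.pyRange_zero_nat, List.map_map]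
  unfold pvArr
  apply List.map_congr_left
  intro i hi
  rw [List.mem_range] at hi
  have hdiv : N / 2 = h := by omega
  set M := N - 1 with hMdef
  have hM2 : 2 * h = M + 1 := by omega
  simp only [Function.comp]
  have e1 : PySem.Int.mod (i : Int) 2 = ((i % 2 : Nat) : Int) := by
    exact_mod_cast PySem.Int.mod_natCast i 2
  have e2 : PySem.Int.floordiv (i : Int) 2 = ((i / 2 : Nat) : Int) := by
    exact_mod_cast PySem.Int.floordiv_natCast i 2
  have e3 : PySem.Int.floordiv (N : Int) 2 = ((N / 2 : Nat) : Int) := by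
    exact_mod_cast PySem.Int.floordiv_natCast N 2
  rw [e1, e2, e3]
  rcases Nat.even_or_odd i with ⟨q, hq⟩ | ⟨q, hq⟩
  · -- even i = q + q : new[i] = arr[i/2]
    have hq2 : i % 2 = 0 := by omega
    have hq2' : i / 2 = q := by omega
    rw [hq2, hq2']
    simp only [Nat.cast_zero, if_true, PySem.List.pyGetD_natCast]
    rw [PySem.List.getD_map_range _ _ _ _ (show q < N by omega)]
    rw [if_pos (show q < M by omega), if_pos (show i < M by omega), hdiv]
    congr 1
    have key : i * h ^ (k + 1) = M * (q * h ^ k) + q * h ^ k := by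
      calc i * h ^ (k + 1) = q * h ^ k * (2 * h) := by rw [hq, pow_succ]; ring
        _ = q * h ^ k * (M + 1) := by rw [hM2]
        _ = M * (q * h ^ k) + q * h ^ k := by ring
    rw [key, Nat.mul_add_mod]
  · -- odd i = 2q+1 : new[i] = arr[n//2 + (i-1)//2]
    have hq2 : i % 2 = 1 := by omega
    rw [hq2]
    have hsub : (i : Int) - 1 = ((i - 1 : Nat) : Int) := by omega
    have e4 : PySem.Int.floordiv ((i - 1 : Nat) : Int) 2 = (((i - 1) / 2 : Nat) : Int) := by
      exact_mod_cast PySem.Int.floordiv_natCast (i - 1) 2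
    rw [hsub, e4]
    have hq3 : (i - 1) / 2 = q := by omega
    rw [hq3, hdiv]
    simp only [Nat.cast_one, if_neg (by norm_num : (1 : Int) ≠ 0), ← Nat.cast_add,
      PySem.List.pyGetD_natCast]
    rw [PySem.List.getD_map_range _ _ _ _ (show h + q < N by omega)]
    by_cases hlast : i < M
    · rw [if_pos (show h + q < M by omega), if_pos hlast]
      congr 1
      have key : i * h ^ (k + 1) = M * (q * h ^ k) + (h + q) * h ^ k := by
        calc i * h ^ (k + 1) = (q * (2 * h) + h) * h ^ k := by rw [hq, pow_succ]; ring
          _ = (q * (M + 1) + h) * h ^ k := by rw [hM2]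
          _ = M * (q * h ^ k) + (h + q) * h ^ k := by ring
      rw [key, Nat.mul_add_mod]
    · have hiM : i = M := by omega
      rw [if_neg (show ¬ h + q < M by omega), if_neg hlast]
      congr 1
      omega

theorem pvArr_zero (N : Nat) : pvArr N 0 = PySem.List.pyRange 0 (N : Int) 1 := by
  rw [PySem.List.pyRange_zero_nat]
  unfold pvArr
  apply List.map_congr_left
  intro i hi
  rw [List.mem_range] at hi
  by_cases h : i < N - 1
  · simp [h, Nat.mod_eq_of_lt h]
  · simp [h]

theorem pvArr_eq_iff (N k : Nat) (h4 : 4 ≤ N) (hev : 2 ∣ N) :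
    (pvArr N k = PySem.List.pyRange 0 (N : Int) 1) ↔ (N / 2) ^ k % (N - 1) = 1 := by
  rw [← pvArr_zero]
  constructor
  · intro hEq
    have h1 : (pvArr N k).getD 1 0 = (pvArr N 0).getD 1 0 := by rw [hEq]
    unfold pvArr at h1
    rw [PySem.List.getD_map_range _ _ _ _ (show 1 < N by omega),
        PySem.List.getD_map_range _ _ _ _ (show 1 < N by omega)] at h1
    rw [if_pos (show 1 < N - 1 by omega), if_pos (show 1 < N - 1 by omega)] at h1
    have h2 : 1 * (N / 2) ^ k % (N - 1) = 1 * (N / 2) ^ 0 % (N - 1) := by exact_mod_cast h1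
    rw [Nat.one_mul, Nat.one_mul, pow_zero, Nat.mod_eq_of_lt (show 1 < N - 1 by omega)] at h2
    exact h2
  · intro hpow
    unfold pvArr
    apply List.map_congr_left
    intro i hi
    rw [List.mem_range] at hi
    by_cases h : i < N - 1
    · rw [if_pos h, if_pos h]
      congr 1
      rw [Nat.mul_mod, hpow, Nat.mul_one, Nat.mod_mod_of_dvd _ (dvd_refl _), pow_zero,
        Nat.mul_one, Nat.mod_eq_of_lt h]
    · rw [if_neg h, if_neg h]

theorem pv_mul_mod_congr (a b c M : Nat) (hab : a % M = b % M) : a * c % M = b * c % M := by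
  rw [Nat.mul_mod, hab, ← Nat.mul_mod]

theorem pv_pow_iff (N k : Nat) (h4 : 4 ≤ N) (hev : 2 ∣ N) :
    (N / 2) ^ k % (N - 1) = 1 ↔ 2 ^ k % (N - 1) = 1 := by
  obtain ⟨h, hN⟩ := hev
  have hh : 2 ≤ h := by omega
  have hdiv : N / 2 = h := by omega
  set M := N - 1 with hM
  have hM3 : 3 ≤ M := by omega
  have hprod : (2 * h) ^ k % M = 1 := by
    have hme : 2 * h ≡ 1 [MOD M] := by
      unfold Nat.ModEq
      rw [show 2 * h = M + 1 by omega, Nat.add_mod_left]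
    have hp := hme.pow k
    unfold Nat.ModEq at hp
    rw [Nat.one_pow, Nat.mod_eq_of_lt (show 1 < M by omega)] at hp
    exact hp
  rw [hdiv]
  constructor
  · intro hk
    have e : h ^ k % M = 1 % M := by rw [hk, Nat.mod_eq_of_lt (show 1 < M by omega)]
    have t := pv_mul_mod_congr (h ^ k) 1 (2 ^ k) M e
    rw [Nat.one_mul, ← mul_pow, mul_comm h 2, hprod] at t
    exact t.symm
  · intro hk
    have e : 2 ^ k % M = 1 % M := by rw [hk, Nat.mod_eq_of_lt (show 1 < M by omega)]
    have t := pv_mul_mod_congr (2 ^ k) 1 (h ^ k) M e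
    rw [Nat.one_mul, ← mul_pow, hprod] at t
    exact t.symm

theorem pv_order_exists (N : Nat) (h4 : 4 ≤ N) (hev : 2 ∣ N) :
    ∃ k, (0 < k ∧ 2 ^ k % (N - 1) = 1) ∧ k ≤ N - 1 := by
  set M := N - 1 with hM
  have hM3 : 3 ≤ M := by omega
  have hodd : ¬ 2 ∣ M := by omega
  have hcop : Nat.Coprime 2 M := (Nat.Prime.coprime_iff_not_dvd Nat.prime_two).mpr hodd
  exact ⟨Nat.totient M, ⟨Nat.totient_pos.mpr (by omega), by
    have := (Nat.ModEq.pow_totient hcop)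
    unfold Nat.ModEq at this
    rwa [Nat.mod_eq_of_lt (show 1 < M by omega)] at this⟩, Nat.totient_le M⟩

theorem pvLoopA_run (N : Nat) (h4 : 4 ≤ N) (hev : 2 ∣ N) (K : Nat)
    (hK1 : 0 < K) (hK2 : 2 ^ K % (N - 1) = 1)
    (hmin : ∀ j, 0 < j → 2 ^ j % (N - 1) = 1 → K ≤ j) :
    ∀ fuel k, 0 < k → k ≤ K → K - k < fuel →
      pvLoopA (N : Int) (PySem.List.pyRange 0 (N : Int) 1) fuel (pvArr N k) (k : Int) = (K : Int) := by
  intro fuel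
  induction fuel with
  | zero => intro k _ _ hlt; omega
  | succ fuel ih =>
    intro k hk0 hkK hlt
    unfold pvLoopA
    by_cases hc : pvArr N k = PySem.List.pyRange 0 (N : Int) 1
    · rw [if_pos hc]
      have : 2 ^ k % (N - 1) = 1 := (pv_pow_iff N k h4 hev).mp ((pvArr_eq_iff N k h4 hev).mp hc)
      have := hmin k hk0 this
      congr 1
      omega
    · rw [if_neg hc]
      have hkne : k ≠ K := by
        intro he
        exact hc ((pvArr_eq_iff N k h4 hev).mpr ((pv_pow_iff N k h4 hev).mpr (he ▸ hK2)))
      rw [pvShuffle_step N k h4 hev]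
      have : ((k : Int) + 1) = ((k + 1 : Nat) : Int) := by push_cast; ring
      rw [this]
      exact ih (k + 1) (by omega) (by omega) (by omega)

theorem pvLoopB_run (N : Nat) (h4 : 4 ≤ N) (hev : 2 ∣ N) (K : Nat)
    (hK1 : 0 < K) (hK2 : 2 ^ K % (N - 1) = 1)
    (hmin : ∀ j, 0 < j → 2 ^ j % (N - 1) = 1 → K ≤ j) :
    ∀ fuel j, j < K → K - j ≤ fuel →
      pvLoopB ((N - 1 : Nat) : Int) fuel ((2 ^ j % (N - 1) : Nat) : Int) (j : Int) = (K : Int) := by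
  intro fuel
  induction fuel with
  | zero => intro j hj hle; omega
  | succ fuel ih =>
    intro j hj hle
    unfold pvLoopB
    show (if PySem.Int.mod (((2 ^ j % (N - 1) : Nat) : Int) * 2) ((N - 1 : Nat) : Int) = 1
        then (j : Int) + 1
        else pvLoopB ((N - 1 : Nat) : Int) fuel
          (PySem.Int.mod (((2 ^ j % (N - 1) : Nat) : Int) * 2) ((N - 1 : Nat) : Int)) ((j : Int) + 1)) = (K : Int)
    have hstep : PySem.Int.mod (((2 ^ j % (N - 1) : Nat) : Int) * 2) ((N - 1 : Nat) : Int)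
        = ((2 ^ (j + 1) % (N - 1) : Nat) : Int) := by
      have : ((2 ^ j % (N - 1) : Nat) : Int) * 2 = ((2 ^ j % (N - 1) * 2 : Nat) : Int) := by
        push_cast; ring
      rw [this, PySem.Int.mod_natCast]
      congr 1
      rw [pow_succ]
      exact Nat.mod_mul_mod (2 ^ j) 2 (N - 1)
    rw [hstep]
    by_cases hc : ((2 ^ (j + 1) % (N - 1) : Nat) : Int) = 1
    · rw [if_pos hc]
      have hc' : 2 ^ (j + 1) % (N - 1) = 1 := by exact_mod_cast hc
      have := hmin (j + 1) (by omega) hc'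
      have : j + 1 = K := by omega
      rw [← this]
      push_cast; ring
    · rw [if_neg hc]
      have hc' : 2 ^ (j + 1) % (N - 1) ≠ 1 := by
        intro he; exact hc (by exact_mod_cast he)
      have hjK : j + 1 < K := by
        rcases Nat.lt_or_ge (j+1) K with h | h
        · exact h
        · exfalso
          apply hc'
          have e : j + 1 = K := by omega
          rw [e]
          exact hK2
      have : ((j : Int) + 1) = ((j + 1 : Nat) : Int) := by push_cast; ring
      rw [this]
      exact ih (j + 1) hjK (by omega)

theorem pv_final (n : Int) (hpre : n ≤ 2 ∨ (2 : Int) ∣ n) :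
    reinitializePermutation n = reinitializePermutation_alt n := by
  by_cases h0 : n ≤ 0
  · have hnil : PySem.List.pyRange 0 n 1 = [] := PySem.List.pyRange_one_eq_nil h0
    have ht : n.toNat = 0 := by omega
    simp [reinitializePermutation, reinitializePermutation_alt, pvShuffle, hnil, ht, pvLoopA,
      show n ≤ 2 by omega]
  · by_cases h2 : n ≤ 2
    · have : n = 1 ∨ n = 2 := by omega
      rcases this with rfl | rfl <;> decide
    · have hdvd : (2 : Int) ∣ n := by tauto
      set N := n.toNat with hNdef
      have hn : n = (N : Int) := by omega
      have h4 : 4 ≤ N := by omega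
      have hevN : 2 ∣ N := by
        obtain ⟨c, hc⟩ := hdvd
        exact ⟨c.toNat, by omega⟩
      obtain ⟨k0, ⟨hk01, hk02⟩, hk0le⟩ := pv_order_exists N h4 hevN
      have hex : ∃ k, 0 < k ∧ 2 ^ k % (N - 1) = 1 := ⟨k0, hk01, hk02⟩
      set K := Nat.find hex with hKdef
      have hK1 : 0 < K := (Nat.find_spec hex).1
      have hK2 : 2 ^ K % (N - 1) = 1 := (Nat.find_spec hex).2
      have hmin : ∀ j, 0 < j → 2 ^ j % (N - 1) = 1 → K ≤ j := fun j a b => Nat.find_min' hex ⟨a, b⟩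
      have hKle : K ≤ N - 1 := le_trans (Nat.find_min' hex ⟨hk01, hk02⟩) hk0le
      -- A side
      have hA : reinitializePermutation n = (K : Int) := by
        unfold reinitializePermutation
        rw [hn]
        show pvLoopA ((N : Nat) : Int) (PySem.List.pyRange 0 ((N : Nat) : Int) 1)
          (((N : Nat) : Int).toNat + 1)
          (pvShuffle ((N : Nat) : Int) (PySem.List.pyRange 0 ((N : Nat) : Int) 1)) 1 = (K : Int)
        have e0 : pvShuffle (N : Int) (PySem.List.pyRange 0 (N : Int) 1) = pvArr N 1 := by
          rw [← pvArr_zero]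
          exact pvShuffle_step N 0 h4 hevN
        have etn : ((N : Int)).toNat = N := Int.toNat_natCast N
        rw [e0, etn]
        have e1 : (1 : Int) = ((1 : Nat) : Int) := by norm_num
        rw [e1]
        exact pvLoopA_run N h4 hevN K hK1 hK2 hmin (N + 1) 1 (by omega) (by omega) (by omega)
      -- B side
      have hB : reinitializePermutation_alt n = (K : Int) := by
        unfold reinitializePermutation_alt
        rw [if_neg h2, hn]
        have etn : ((N : Int)).toNat = N := Int.toNat_natCast N
        have em : (N : Int) - 1 = ((N - 1 : Nat) : Int) := by omega
        have e1 : (1 : Int) = ((2 ^ 0 % (N - 1) : Nat) : Int) := by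
          rw [pow_zero, Nat.mod_eq_of_lt (by omega)]
          norm_num
        have e00 : (0 : Int) = ((0 : Nat) : Int) := by norm_num
        rw [etn, em, e1, e00]
        exact pvLoopB_run N h4 hevN K hK1 hK2 hmin N 0 (by omega) (by omega)
      rw [hA, hB]

-- ===== VERDICT (by name: the statement is the Claim_ definition above) =====
theorem reinitializePermutation_spec : Claim_equal_reinitializePermutation := by
  intro n _ hpre
  unfold Spec_reinitializePermutation
  exact pv_final n hpre
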